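-- pv_equiv track=rewrite | github.com/hitesh-vs/AutoPano | test.py | find_best_reference_image
-- ===== SOURCE A (Python) =====
-- def find_best_reference_image(component, matches_graph):
--     """
--     Find the best reference image in a component based on number of matches.
--     """
--     match_counts = {}
--     for i in component:
--         count = 0
--         for j in component:
--             if i == j: continue
--             pair = tuple(sorted([i, j]))
--             count += matches_graph[pair]['num_matches'] if pair in matches_graph else 0
--         match_counts[i] = count
--
--     return max(match_counts.items(), key=lambda x: x[1])[0]
-- ===== SOURCE B (Python) =====
-- def _apply_edge(mult, counts, pair, val):
--     """Credit one graph edge to both of its endpoints (if both are in the component)."""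
--     if len(pair) == 2:
--         a, b = pair
--         if a < b and a in counts and b in counts:
--             w = val['num_matches']
--             counts[a] += mult[b] * w
--             counts[b] += mult[a] * w
--     return counts
--
--
-- def find_best_reference_image(component, matches_graph):
--     """
--     Find the best reference image in a component based on number of matches.
--
--     Single pass over the edges of matches_graph instead of a quadratic
--     double loop over the component.
--     """
--     mult = {}
--     for i in component:
--         mult[i] = mult.get(i, 0) + 1
--     counts = {i: 0 for i in mult}
--     for pair, val in matches_graph.items():
--         counts = _apply_edge(mult, counts, pair, val)
--     return max(counts.items(), key=lambda x: x[1])[0]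
-- ===== Notes on version B (the rewrite author's own statement) =====
-- stated objective: faster
-- what changed: Replaces the quadratic double loop over the component (with a dict lookup per ordered pair) by a multiplicity counter plus a single pass over the edges of matches_graph that credits both endpoints of each edge at once.
import Mathlib
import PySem

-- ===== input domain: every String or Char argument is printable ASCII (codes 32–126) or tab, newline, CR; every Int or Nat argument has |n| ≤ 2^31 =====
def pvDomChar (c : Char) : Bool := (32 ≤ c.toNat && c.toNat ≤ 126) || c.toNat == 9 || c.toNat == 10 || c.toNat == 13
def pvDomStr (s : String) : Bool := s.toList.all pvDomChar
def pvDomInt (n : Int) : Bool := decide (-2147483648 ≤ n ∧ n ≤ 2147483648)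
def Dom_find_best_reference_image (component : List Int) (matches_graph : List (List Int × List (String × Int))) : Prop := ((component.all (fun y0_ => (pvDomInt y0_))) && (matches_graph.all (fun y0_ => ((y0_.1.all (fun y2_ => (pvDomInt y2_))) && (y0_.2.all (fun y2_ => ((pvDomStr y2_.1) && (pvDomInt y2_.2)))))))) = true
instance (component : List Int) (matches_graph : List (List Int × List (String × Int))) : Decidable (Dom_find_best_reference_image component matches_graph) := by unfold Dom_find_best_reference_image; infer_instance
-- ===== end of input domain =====

-- B replaces A's quadratic double loop over the component by a multiplicity counter
-- plus one pass over the edges of matches_graph (faster; same result).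


-- ===== PORT A =====
-- A-side helper: the expression `matches_graph[pair]['num_matches'] if pair in matches_graph else 0`
def pvWeight (matches_graph : List (List Int × List (String × Int))) (pair : List Int) : Int :=
  match (PySem.Dict.mk matches_graph).get? pair with
  | some v => (PySem.Dict.mk v).getD "num_matches" 0
  | none => 0

def find_best_reference_image (component : List Int) (matches_graph : List (List Int × List (String × Int))) : Int :=
  let match_counts : PySem.Dict Int Int :=
    component.foldl (fun d i =>
      let count : Int :=
        component.foldl (fun count j =>
          if i == j then count
          else count + pvWeight matches_graph (PySem.List.sorted [i, j] (fun x => x) false)) 0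
      d.insert i count) (PySem.Dict.mk [])
  ((PySem.List.max? match_counts.items (fun x => x.2)).map (fun x => x.1)).getD 0

-- ===== PORT B =====
-- B-side helper: credit one graph edge to both of its endpoints (Python helper _apply_edge)
def pvApplyEdge (mult : PySem.Dict Int Int) (counts : PySem.Dict Int Int)
    (pair : List Int) (val : List (String × Int)) : PySem.Dict Int Int :=
  match pair with
  | [a, b] =>
    if a < b && counts.contains a && counts.contains b then
      let w : Int := (PySem.Dict.mk val).getD "num_matches" 0
      let d1 := counts.insert a (counts.getD a 0 + mult.getD b 0 * w)
      d1.insert b (d1.getD b 0 + mult.getD a 0 * w)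
    else counts
  | _ => counts

def find_best_reference_image_alt (component : List Int) (matches_graph : List (List Int × List (String × Int))) : Int :=
  let mult : PySem.Dict Int Int :=
    component.foldl (fun d i => d.insert i (d.getD i 0 + 1)) (PySem.Dict.mk [])
  let counts0 : PySem.Dict Int Int :=
    mult.items.foldl (fun d p => d.insert p.1 0) (PySem.Dict.mk [])
  let counts : PySem.Dict Int Int :=
    matches_graph.foldl (fun d p => pvApplyEdge mult d p.1 p.2) counts0
  ((PySem.List.max? counts.items (fun x => x.2)).map (fun x => x.1)).getD 0

-- ===== PRECONDITION & SPEC =====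
-- Pre_ excludes: (a) the empty component and (b) components touching a graph entry whose value
-- lacks the key "num_matches" — Python A raises ValueError resp. KeyError there; and (c)
-- association lists with duplicate outer keys, which do not represent any Python dict.
def Pre_find_best_reference_image (component : List Int) (matches_graph : List (List Int × List (String × Int))) : Prop :=
  component ≠ [] ∧
  (matches_graph.map (fun p => p.1)).Nodup ∧
  ∀ i ∈ component, ∀ j ∈ component, i ≠ j →
    (((PySem.Dict.mk matches_graph).get? (PySem.List.sorted [i, j] (fun x => x) false)).all
      (fun v => (PySem.Dict.mk v).contains "num_matches")) = true
instance (component : List Int) (matches_graph : List (List Int × List (String × Int))) : Decidable (Pre_find_best_reference_image component matches_graph) := by unfold Pre_find_best_reference_image; infer_instance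

def pvWitness_find_best_reference_image : List Int × (List (List Int × List (String × Int))) :=
  ([1, 2, 3], [([1, 2], [("num_matches", 5)]), ([2, 3], [("num_matches", 7)])])

def Spec_find_best_reference_image (component : List Int) (matches_graph : List (List Int × List (String × Int))) (out : Int) : Prop := out = find_best_reference_image_alt component matches_graph
instance (component : List Int) (matches_graph : List (List Int × List (String × Int))) (out : Int) : Decidable (Spec_find_best_reference_image component matches_graph out) := by unfold Spec_find_best_reference_image; infer_instance

-- ===== CLAIM (what is proved, stated in full; the proofs are below) =====
def Claim_equal_find_best_reference_image : Prop := ∀ (component : List Int) (matches_graph : List (List Int × List (String × Int))), Dom_find_best_reference_image component matches_graph → Pre_find_best_reference_image component matches_graph → Spec_find_best_reference_image component matches_graph (find_best_reference_image component matches_graph)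

-- ===== LEMMAS AND PROOFS =====

-- ordered key-set accumulation (first occurrences), as performed by repeated Dict.insert
def pvStep (ks : List Int) (x : Int) : List Int := if x ∈ ks then ks else ks ++ [x]
def pvKS (acc : List Int) (l : List Int) : List Int := l.foldl pvStep acc

def pvKey (i j : Int) : List Int := if j < i then [j, i] else [i, j]
def pvWV (v : List (String × Int)) : Int := (PySem.Dict.mk v).getD "num_matches" 0
def pvCA (component : List Int) (g : List (List Int × List (String × Int))) (i : Int) : Int :=
  (component.map (fun j => if i = j then 0 else pvWeight g (pvKey i j))).sum
def pvContrib (component : List Int) (i : Int) (e : List Int × List (String × Int)) : Int :=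
  match e.1 with
  | [a, b] =>
      if a < b ∧ a ∈ component ∧ b ∈ component then
        (if i = a then (component.count b : Int) * pvWV e.2 else 0)
        + (if i = b then (component.count a : Int) * pvWV e.2 else 0)
      else 0
  | _ => 0
def pvCB (component : List Int) (g : List (List Int × List (String × Int))) (i : Int) : Int :=
  (g.map (pvContrib component i)).sum

lemma pv_sorted_two (i j : Int) :
    PySem.List.sorted [i, j] (fun x => x) false = pvKey i j := by
  simp [PySem.List.sorted, PySem.List.insertBy, pvKey]


lemma pv_contains_tbl (ks : List Int) (F : Int → Int) (x : Int) :
    (PySem.Dict.mk (ks.map (fun i => (i, F i)))).contains x = decide (x ∈ ks) := by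
  induction ks with
  | nil => simp [PySem.Dict.contains]
  | cons h t ih =>
    simp [PySem.Dict.contains] at ih ⊢
    by_cases hx : h = x
    · simp [hx]
    · simp [hx, ih, Ne.symm hx]


lemma pv_getD_tbl (ks : List Int) (F : Int → Int) (x : Int) :
    (PySem.Dict.mk (ks.map (fun i => (i, F i)))).getD x 0 = if x ∈ ks then F x else 0 := by
  induction ks with
  | nil => simp [PySem.Dict.getD, PySem.Dict.get?]
  | cons h t ih =>
    simp only [PySem.Dict.getD, PySem.Dict.get?, List.find?_map, Option.map_map] at ih ⊢
    simp only [List.find?_cons, Function.comp] at ih ⊢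
    by_cases hx : h = x
    · simp [hx]
    · have hbe : (h == x) = false := by simp [hx]
      rw [hbe]
      simp only [List.mem_cons]
      simp [ih, Ne.symm hx]


lemma pv_items_insert_tbl (ks : List Int) (F G : Int → Int) (x : Int)
    (hG : ∀ i, i ≠ x → G i = F i) :
    ((PySem.Dict.mk (ks.map (fun i => (i, F i)))).insert x (G x)).items
      = (pvStep ks x).map (fun i => (i, G i)) := by
  simp only [PySem.Dict.insert, pv_contains_tbl, pvStep]
  by_cases hx : x ∈ ks
  · simp only [hx, decide_true, if_true, List.map_map]
    apply List.map_congr_left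
    intro i hi
    by_cases hix : i = x
    · simp [hix]
    · simp [hix, hG i hix]
  · simp only [hx, decide_false, if_false, Bool.false_eq_true, List.map_append]
    congr 1
    apply List.map_congr_left
    intro i hi
    have : i ≠ x := fun h => hx (h ▸ hi)
    simp [hG i this]


lemma pv_mem_KS (acc l : List Int) (x : Int) : x ∈ pvKS acc l ↔ x ∈ acc ∨ x ∈ l := by
  induction l generalizing acc with
  | nil => simp [pvKS]
  | cons h t ih =>
    simp only [pvKS, List.foldl_cons] at ih ⊢
    rw [ih]
    by_cases hh : h ∈ acc <;> simp [pvStep, hh] <;> by_cases hx : x = h <;> simp [hx, hh]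


lemma pv_nodup_KS (acc l : List Int) (h : acc.Nodup) : (pvKS acc l).Nodup := by
  induction l generalizing acc with
  | nil => simpa [pvKS]
  | cons a t ih =>
    simp only [pvKS, List.foldl_cons]
    apply ih
    by_cases ha : a ∈ acc
    · simpa [pvStep, ha]
    · rw [pvStep, if_neg ha, List.nodup_append]
      refine ⟨h, by simp, ?_⟩
      intro y hy z hz
      rw [List.mem_singleton] at hz
      subst hz
      intro h'
      subst h'
      exact ha hy


lemma pv_KS_disjoint (l : List Int) : ∀ acc, l.Nodup → (∀ x ∈ l, x ∉ acc) → pvKS acc l = acc ++ l := by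
  induction l with
  | nil => intro acc _ _; simp [pvKS]
  | cons a t ih =>
    intro acc hnd hdisj
    have ha : a ∉ acc := hdisj a (by simp)
    simp only [pvKS, List.foldl_cons, pvStep, ha, if_false]
    have := ih (acc ++ [a]) hnd.of_cons (by
      intro x hx
      simp only [List.mem_append, List.mem_singleton]
      rintro (h1 | h2)
      · exact hdisj x (by simp [hx]) h1
      · exact (List.nodup_cons.mp hnd).1 (h2 ▸ hx))
    simp only [pvKS] at this
    rw [this, List.append_assoc]
    simp

lemma pv_KS_nodup_id (l : List Int) (h : l.Nodup) : pvKS [] l = l := by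
  simpa using pv_KS_disjoint l [] h (by simp)


lemma pv_sum_ite_count (l : List Int) (b c : Int) :
    (l.map (fun j => if j = b then c else 0)).sum = (l.count b : Int) * c := by
  induction l with
  | nil => simp
  | cons h t ih =>
    simp only [List.map_cons, List.sum_cons, List.count_cons, ih]
    by_cases hb : h = b <;> simp [hb] <;> push_cast <;> ring


-- the inner accumulation loop of A is a map-sum
lemma pv_innerA (component : List Int) (g : List (List Int × List (String × Int))) (i : Int) :
    (component.foldl (fun count j =>
        if i == j then count
        else count + pvWeight g (PySem.List.sorted [i, j] (fun x => x) false)) 0)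
      = pvCA component g i := by
  suffices h : ∀ (l : List Int) (s : Int),
      l.foldl (fun count j =>
        if i == j then count
        else count + pvWeight g (PySem.List.sorted [i, j] (fun x => x) false)) s
      = s + (l.map (fun j => if i = j then 0 else pvWeight g (pvKey i j))).sum by
    simpa [pvCA] using h component 0
  intro l
  induction l with
  | nil => intro s; simp
  | cons a t ih =>
    intro s
    simp only [pv_sorted_two] at ih ⊢
    simp only [List.foldl_cons, List.map_cons, List.sum_cons]
    by_cases hia : i = a
    · rw [if_pos (by simp [hia]), ih, if_pos hia]
      ring
    · rw [if_neg (by simp [hia]), ih, if_neg hia]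
      ring


-- A's outer loop builds the table of pvCA values over the first-occurrence key list
lemma pv_foldlA (component g : _) :
    (component.foldl (fun (d : PySem.Dict Int Int) i =>
        d.insert i (pvCA component g i)) (PySem.Dict.mk [])).items
      = (pvKS [] component).map (fun i => (i, pvCA component g i)) := by
  suffices h : ∀ (l : List Int) (ks : List Int),
      (l.foldl (fun (d : PySem.Dict Int Int) i => d.insert i (pvCA component g i))
        (PySem.Dict.mk (ks.map (fun i => (i, pvCA component g i))))).items
      = (pvKS ks l).map (fun i => (i, pvCA component g i)) by
    simpa using h component []
  intro l
  induction l with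
  | nil => intro ks; simp [pvKS]
  | cons a t ih =>
    intro ks
    simp only [List.foldl_cons]
    have hstep : (PySem.Dict.mk (ks.map (fun i => (i, pvCA component g i)))).insert a (pvCA component g a)
        = PySem.Dict.mk ((pvStep ks a).map (fun i => (i, pvCA component g i))) := by
      apply PySem.Dict.ext
      exact pv_items_insert_tbl ks _ _ a (fun _ _ => rfl)
    rw [hstep, ih]
    simp [pvKS]


-- B's multiplicity loop builds the running-count table
lemma pv_mult (component : List Int) :
    (component.foldl (fun (d : PySem.Dict Int Int) i => d.insert i (d.getD i 0 + 1))
        (PySem.Dict.mk [])).items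
      = (pvKS [] component).map (fun i => (i, (component.count i : Int))) := by
  suffices h : ∀ (l : List Int) (p : List Int),
      (l.foldl (fun (d : PySem.Dict Int Int) i => d.insert i (d.getD i 0 + 1))
        (PySem.Dict.mk ((pvKS [] p).map (fun i => (i, (p.count i : Int)))))).items
      = (pvKS [] (p ++ l)).map (fun i => (i, ((p ++ l).count i : Int))) by
    simpa using h component []
  intro l
  induction l with
  | nil => intro p; simp
  | cons a t ih =>
    intro p
    simp only [List.foldl_cons]
    have hKS : pvKS [] (p ++ [a]) = pvStep (pvKS [] p) a := by
      simp [pvKS, List.foldl_append]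
    have hval : (PySem.Dict.mk ((pvKS [] p).map (fun i => (i, (p.count i : Int))))).getD a 0 + 1
        = (((p ++ [a]).count a : Nat) : Int) := by
      rw [pv_getD_tbl]
      by_cases ha : a ∈ p
      · rw [if_pos ((pv_mem_KS [] p a).mpr (by simp [ha]))]
        simp [List.count_append]
      · rw [if_neg (by rw [pv_mem_KS]; simp [ha])]
        simp [List.count_append, List.count_eq_zero.mpr ha]
    have hstep : (PySem.Dict.mk ((pvKS [] p).map (fun i => (i, (p.count i : Int))))).insert a
          ((PySem.Dict.mk ((pvKS [] p).map (fun i => (i, (p.count i : Int))))).getD a 0 + 1)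
        = PySem.Dict.mk ((pvStep (pvKS [] p) a).map (fun i => (i, ((p ++ [a]).count i : Int)))) := by
      apply PySem.Dict.ext
      rw [hval]
      exact pv_items_insert_tbl (pvKS [] p) (fun i => (p.count i : Int))
        (fun i => ((p ++ [a]).count i : Int)) a
        (by
          intro i hia
          simp [List.count_append, List.count_eq_zero.mpr, hia, List.count_singleton])
    rw [hstep, ← hKS, ih]
    simp


-- B's zero-initialisation keeps the key list
lemma pv_counts0 (component : List Int) :
    (((pvKS [] component).map (fun i => (i, (component.count i : Int)))).foldl
        (fun (d : PySem.Dict Int Int) p => d.insert p.1 0) (PySem.Dict.mk [])).items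
      = (pvKS [] component).map (fun i => (i, (0 : Int))) := by
  suffices h : ∀ (kl : List Int) (ks : List Int),
      ((kl.map (fun i => (i, (component.count i : Int)))).foldl
        (fun (d : PySem.Dict Int Int) p => d.insert p.1 0)
        (PySem.Dict.mk (ks.map (fun i => (i, (0 : Int)))))).items
      = (pvKS ks kl).map (fun i => (i, (0 : Int))) by
    have := h (pvKS [] component) []
    simpa [pv_KS_nodup_id _ (pv_nodup_KS [] component (by simp))] using this
  intro kl
  induction kl with
  | nil => intro ks; simp [pvKS]
  | cons a t ih =>
    intro ks
    simp only [List.map_cons, List.foldl_cons]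
    have hstep : (PySem.Dict.mk (ks.map (fun i => (i, (0 : Int))))).insert a 0
        = PySem.Dict.mk ((pvStep ks a).map (fun i => (i, (0 : Int)))) := by
      apply PySem.Dict.ext
      exact pv_items_insert_tbl ks _ _ a (fun _ _ => rfl)
    rw [hstep, ih]
    simp [pvKS]


-- one edge step on a count table adds pvContrib
lemma pv_edgeStep_tbl (component : List Int) (F : Int → Int) (k : List Int) (v : List (String × Int)) :
    pvApplyEdge (PySem.Dict.mk ((pvKS [] component).map (fun i => (i, (component.count i : Int)))))
        (PySem.Dict.mk ((pvKS [] component).map (fun i => (i, F i)))) k v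
      = PySem.Dict.mk ((pvKS [] component).map (fun i => (i, F i + pvContrib component i (k, v)))) := by
  rcases k with _ | ⟨a, k2⟩
  · apply PySem.Dict.ext
    simp [pvApplyEdge, pvContrib]
  · rcases k2 with _ | ⟨b, k3⟩
    · apply PySem.Dict.ext
      simp [pvApplyEdge, pvContrib]
    · rcases k3 with _ | ⟨c, rest⟩
      · -- key [a, b]
        by_cases hg : a < b ∧ a ∈ component ∧ b ∈ component
        · have hKa : a ∈ pvKS [] component := (pv_mem_KS [] component a).mpr (Or.inr hg.2.1)
          have hKb : b ∈ pvKS [] component := (pv_mem_KS [] component b).mpr (Or.inr hg.2.2)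
          have hab : a ≠ b := by omega
          have hcond : (decide (a < b)
              && (PySem.Dict.mk ((pvKS [] component).map (fun i => (i, F i)))).contains a
              && (PySem.Dict.mk ((pvKS [] component).map (fun i => (i, F i)))).contains b) = true := by
            rw [pv_contains_tbl, pv_contains_tbl]
            simp [hg.1, hKa, hKb]
          rw [pvApplyEdge, if_pos hcond]
          dsimp only
          have hv1 : (PySem.Dict.mk ((pvKS [] component).map (fun i => (i, F i)))).getD a 0 +
              (PySem.Dict.mk ((pvKS [] component).map (fun i => (i, (component.count i : Int))))).getD b 0
                * (PySem.Dict.mk v).getD "num_matches" 0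
              = (fun i => F i + (if i = a then (component.count b : Int) * pvWV v else 0)) a := by
            rw [pv_getD_tbl, pv_getD_tbl, if_pos hKa, if_pos hKb]
            simp [pvWV]
          have h1 : (PySem.Dict.mk ((pvKS [] component).map (fun i => (i, F i)))).insert a
                ((PySem.Dict.mk ((pvKS [] component).map (fun i => (i, F i)))).getD a 0 +
                  (PySem.Dict.mk ((pvKS [] component).map (fun i => (i, (component.count i : Int))))).getD b 0
                    * (PySem.Dict.mk v).getD "num_matches" 0)
              = PySem.Dict.mk ((pvKS [] component).map
                  (fun i => (i, F i + (if i = a then (component.count b : Int) * pvWV v else 0)))) := by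
            apply PySem.Dict.ext
            rw [hv1, pv_items_insert_tbl (pvKS [] component) F
              (fun i => F i + (if i = a then (component.count b : Int) * pvWV v else 0)) a
              (by intro i hia; simp [hia])]
            simp [pvStep, hKa]
          rw [h1]
          have hv2 : (PySem.Dict.mk ((pvKS [] component).map
                  (fun i => (i, F i + (if i = a then (component.count b : Int) * pvWV v else 0))))).getD b 0 +
              (PySem.Dict.mk ((pvKS [] component).map (fun i => (i, (component.count i : Int))))).getD a 0
                * (PySem.Dict.mk v).getD "num_matches" 0
              = (fun i => F i + pvContrib component i ([a, b], v)) b := by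
            rw [pv_getD_tbl, pv_getD_tbl, if_pos hKb, if_pos hKa]
            simp [pvWV, pvContrib, hg, Ne.symm hab]
          have h2 : (PySem.Dict.mk ((pvKS [] component).map
                  (fun i => (i, F i + (if i = a then (component.count b : Int) * pvWV v else 0))))).insert b
                ((PySem.Dict.mk ((pvKS [] component).map
                  (fun i => (i, F i + (if i = a then (component.count b : Int) * pvWV v else 0))))).getD b 0 +
                  (PySem.Dict.mk ((pvKS [] component).map (fun i => (i, (component.count i : Int))))).getD a 0
                    * (PySem.Dict.mk v).getD "num_matches" 0)
              = PySem.Dict.mk ((pvKS [] component).map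
                  (fun i => (i, F i + pvContrib component i ([a, b], v)))) := by
            apply PySem.Dict.ext
            rw [hv2, pv_items_insert_tbl (pvKS [] component)
              (fun i => F i + (if i = a then (component.count b : Int) * pvWV v else 0))
              (fun i => F i + pvContrib component i ([a, b], v)) b
              (by intro i hib; simp [pvContrib, hg, hib])]
            simp [pvStep, hKb]
          rw [h2]
        · have hcond : ¬ ((decide (a < b)
              && (PySem.Dict.mk ((pvKS [] component).map (fun i => (i, F i)))).contains a
              && (PySem.Dict.mk ((pvKS [] component).map (fun i => (i, F i)))).contains b) = true) := by
            rw [pv_contains_tbl, pv_contains_tbl]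
            simp only [Bool.and_eq_true, decide_eq_true_eq, pv_mem_KS]
            simp only [List.not_mem_nil, false_or]
            tauto
          rw [pvApplyEdge, if_neg hcond]
          apply PySem.Dict.ext
          simp [pvContrib, hg]
      · apply PySem.Dict.ext
        simp [pvApplyEdge, pvContrib]

-- B's edge loop accumulates pvContrib
lemma pv_graphFold (component : List Int)
    (g : List (List Int × List (String × Int))) (F : Int → Int) :
    (g.foldl (fun (d : PySem.Dict Int Int) p =>
        pvApplyEdge (PySem.Dict.mk ((pvKS [] component).map (fun i => (i, (component.count i : Int))))) d p.1 p.2)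
      (PySem.Dict.mk ((pvKS [] component).map (fun i => (i, F i))))).items
      = (pvKS [] component).map (fun i => (i, F i + pvCB component g i)) := by
  induction g generalizing F with
  | nil => simp [pvCB]
  | cons e t ih =>
    rw [List.foldl_cons, pv_edgeStep_tbl, ih]
    apply List.map_congr_left
    intro i hi
    simp only [pvCB, List.map_cons, List.sum_cons, Prod.mk.injEq, true_and]
    ring

-- weight lookups in the graph list
lemma pv_weight_cons (e : List Int × List (String × Int)) (g : List (List Int × List (String × Int)))
    (k : List Int) : pvWeight (e :: g) k = if e.1 = k then pvWV e.2 else pvWeight g k := by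
  by_cases h : e.1 = k
  · simp [pvWeight, PySem.Dict.get?, List.find?_cons, h, pvWV]
  · have : (e.1 == k) = false := by simp [h]
    simp [pvWeight, PySem.Dict.get?, this, h]

lemma pv_weight_zero (g : List (List Int × List (String × Int))) (k : List Int)
    (h : k ∉ g.map (fun p => p.1)) : pvWeight g k = 0 := by
  induction g with
  | nil => rfl
  | cons e t ih =>
    simp only [List.map_cons, List.mem_cons] at h
    push Not at h
    rw [pv_weight_cons, if_neg (Ne.symm h.1)]
    exact ih h.2

-- counting the j's that reach a given key
lemma pv_count_pairs (component : List Int) (i : Int) (hi : i ∈ component)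
    (k : List Int) (v : List (String × Int)) :
    (component.map (fun j => if i ≠ j ∧ pvKey i j = k then pvWV v else 0)).sum
      = pvContrib component i (k, v) := by
  rcases k with _ | ⟨a, k2⟩
  · rw [show pvContrib component i ([], v) = 0 from rfl]
    apply List.sum_eq_zero
    intro x hx
    obtain ⟨j, hj, rfl⟩ := List.mem_map.mp hx
    rw [if_neg]
    rintro ⟨hij, hkey⟩
    simp only [pvKey] at hkey
    split_ifs at hkey <;> simp at hkey
  · rcases k2 with _ | ⟨b, k3⟩
    · rw [show pvContrib component i ([a], v) = 0 from rfl]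
      apply List.sum_eq_zero
      intro x hx
      obtain ⟨j, hj, rfl⟩ := List.mem_map.mp hx
      rw [if_neg]
      rintro ⟨hij, hkey⟩
      simp only [pvKey] at hkey
      split_ifs at hkey <;> simp at hkey
    · rcases k3 with _ | ⟨c, rest⟩
      · -- key [a, b]
        by_cases hab : a < b
        · by_cases hia : i = a
          · have hpt : ∀ j : Int, (if i ≠ j ∧ pvKey i j = [a, b] then pvWV v else 0)
                = (if j = b then pvWV v else 0) := by
              intro j
              by_cases hj : j = b
              · rw [if_pos hj, if_pos ⟨by omega, by rw [pvKey, if_neg (by omega), hia, hj]⟩]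
              · rw [if_neg ?_, if_neg hj]
                rintro ⟨hij, hkey⟩
                rw [pvKey] at hkey
                split_ifs at hkey with hlt <;>
                  · simp only [List.cons.injEq, and_true] at hkey
                    omega
            simp only [hpt, pv_sum_ite_count]
            have ha' : a ∈ component := by rw [← hia]; exact hi
            by_cases hbc : b ∈ component
            · simp only [pvContrib]
              rw [if_pos ⟨hab, ha', hbc⟩, if_pos hia, if_neg (by omega)]
              ring
            · simp only [pvContrib]
              rw [if_neg (fun hh => hbc hh.2.2), List.count_eq_zero.mpr hbc]
              simp
          · by_cases hib : i = b
            · have hpt : ∀ j : Int, (if i ≠ j ∧ pvKey i j = [a, b] then pvWV v else 0)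
                  = (if j = a then pvWV v else 0) := by
                intro j
                by_cases hj : j = a
                · rw [if_pos hj, if_pos ⟨by omega, by rw [pvKey, if_pos (by omega), hib, hj]⟩]
                · rw [if_neg ?_, if_neg hj]
                  rintro ⟨hij, hkey⟩
                  rw [pvKey] at hkey
                  split_ifs at hkey with hlt <;>
                    · simp only [List.cons.injEq, and_true] at hkey
                      omega
              simp only [hpt, pv_sum_ite_count]
              have hb' : b ∈ component := by rw [← hib]; exact hi
              by_cases hac : a ∈ component
              · simp only [pvContrib]
                rw [if_pos ⟨hab, hac, hb'⟩, if_pos hib, if_neg (by omega)]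
                ring
              · simp only [pvContrib]
                rw [if_neg (fun hh => hac hh.2.1), List.count_eq_zero.mpr hac]
                simp
            · rw [show pvContrib component i ([a, b], v) = 0 from by
                simp [pvContrib, hia, hib]]
              apply List.sum_eq_zero
              intro x hx
              obtain ⟨j, hj, rfl⟩ := List.mem_map.mp hx
              rw [if_neg]
              rintro ⟨hij, hkey⟩
              rw [pvKey] at hkey
              split_ifs at hkey with hlt <;>
                · simp only [List.cons.injEq, and_true] at hkey
                  omega
        · rw [show pvContrib component i ([a, b], v) = 0 from by
            simp only [pvContrib]
            rw [if_neg (fun hh => hab hh.1)]]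
          apply List.sum_eq_zero
          intro x hx
          obtain ⟨j, hj, rfl⟩ := List.mem_map.mp hx
          rw [if_neg]
          rintro ⟨hij, hkey⟩
          rw [pvKey] at hkey
          split_ifs at hkey with hlt <;>
            · simp only [List.cons.injEq, and_true] at hkey
              omega
      · rw [show pvContrib component i (a :: b :: c :: rest, v) = 0 from rfl]
        apply List.sum_eq_zero
        intro x hx
        obtain ⟨j, hj, rfl⟩ := List.mem_map.mp hx
        rw [if_neg]
        rintro ⟨hij, hkey⟩
        simp only [pvKey] at hkey
        split_ifs at hkey <;> simp at hkey

-- the crux: per-node double-loop total equals per-edge accumulation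
lemma pv_crux (component : List Int) (g : List (List Int × List (String × Int)))
    (hnd : (g.map (fun p => p.1)).Nodup) (i : Int) (hi : i ∈ component) :
    pvCA component g i = pvCB component g i := by
  induction g with
  | nil =>
    simp only [pvCA, pvCB, List.map_nil, List.sum_nil]
    rw [List.sum_eq_zero]
    intro x hx
    obtain ⟨j, hj, rfl⟩ := List.mem_map.mp hx
    rw [show pvWeight [] (pvKey i j) = 0 from rfl]
    simp
  | cons e t ih =>
    simp only [List.map_cons, List.nodup_cons] at hnd
    have hpt : ∀ j : Int, (if i = j then 0 else pvWeight (e :: t) (pvKey i j))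
        = (if i = j then 0 else pvWeight t (pvKey i j))
          + (if i ≠ j ∧ pvKey i j = e.1 then pvWV e.2 else 0) := by
      intro j
      by_cases hij : i = j
      · simp [hij]
      · rw [if_neg hij, if_neg hij, pv_weight_cons]
        by_cases hk : e.1 = pvKey i j
        · rw [if_pos hk, if_pos ⟨hij, hk.symm⟩,
            pv_weight_zero t (pvKey i j) (by rw [← hk]; exact hnd.1)]
          ring
        · rw [if_neg hk, if_neg (fun hh => hk hh.2.symm)]
          ring
    simp only [pvCA, pvCB, List.map_cons, List.sum_cons]
    simp only [hpt, PySem.List.sum_map_add_int]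
    have h1 : (component.map (fun j => if i = j then 0 else pvWeight t (pvKey i j))).sum
        = pvCB component t i := by
      rw [← ih hnd.2]
      rfl
    rw [h1, pv_count_pairs component i hi e.1 e.2]
    simp only [pvCB]
    ring
-- ===== VERDICT (by name: the statement is the Claim_ definition above) =====
theorem find_best_reference_image_spec : Claim_equal_find_best_reference_image := by
  intro component matches_graph hdom hpre
  obtain ⟨hne, hnd, hnum⟩ := hpre
  unfold Spec_find_best_reference_image
  simp only [find_best_reference_image, find_best_reference_image_alt]
  have hAitems : (component.foldl (fun (d : PySem.Dict Int Int) i =>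
        d.insert i (component.foldl (fun count j =>
          if i == j then count
          else count + pvWeight matches_graph (PySem.List.sorted [i, j] (fun x => x) false)) 0))
        (PySem.Dict.mk [])).items
      = (pvKS [] component).map (fun i => (i, pvCA component matches_graph i)) := by
    rw [show (fun (d : PySem.Dict Int Int) i =>
        d.insert i (component.foldl (fun count j =>
          if i == j then count
          else count + pvWeight matches_graph (PySem.List.sorted [i, j] (fun x => x) false)) 0))
        = (fun (d : PySem.Dict Int Int) i => d.insert i (pvCA component matches_graph i)) from by
      funext d i
      rw [pv_innerA]]
    exact pv_foldlA component matches_graph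
  have hmult : (component.foldl (fun (d : PySem.Dict Int Int) i => d.insert i (d.getD i 0 + 1))
        (PySem.Dict.mk []))
      = PySem.Dict.mk ((pvKS [] component).map (fun i => (i, (component.count i : Int)))) :=
    PySem.Dict.ext (pv_mult component)
  rw [hAitems, hmult]
  have hc0 : ((PySem.Dict.mk ((pvKS [] component).map
          (fun i => (i, (component.count i : Int))))).items.foldl
        (fun (d : PySem.Dict Int Int) p => d.insert p.1 0) (PySem.Dict.mk []))
      = PySem.Dict.mk ((pvKS [] component).map (fun i => (i, (0 : Int)))) :=
    PySem.Dict.ext (pv_counts0 component)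
  rw [hc0]
  have hgf := pv_graphFold component matches_graph (fun _ => 0)
  rw [hgf]
  have hmaps : (pvKS [] component).map (fun i => (i, pvCA component matches_graph i))
      = (pvKS [] component).map (fun i => (i, (0 : Int) + pvCB component matches_graph i)) := by
    apply List.map_congr_left
    intro i hi
    have hic : i ∈ component := by
      have := (pv_mem_KS [] component i).mp hi
      simpa using this
    rw [pv_crux component matches_graph hnd i hic]
    simp
  rw [hmaps]
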